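-- pv_equiv track=rewrite | github.com/FAdy-200/problem_solving | leetcode/36.py | check
-- ===== SOURCE A (Python) =====
-- from collections import defaultdict
--
-- def check(array):
--     for i in array:
--         co = defaultdict(lambda: 0)
--         for j in i:
--             if j != ".":
--                 co[j] += 1
--         if not len(co.values()):
--             continue
--         if max(co.values()) > 1:
--             return False
--     return True
-- ===== SOURCE B (Python) =====
-- def check(array):
--     for row in array:
--         s = sorted(v for v in row if v != ".")
--         for a, b in zip(s, s[1:]):
--             if a == b:
--                 return False
--     return True
-- ===== Notes on version B (the rewrite author's own statement) =====
-- stated objective: alternative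
-- what changed: B replaces A's per-row count dictionary and max-of-counts scan with sort-then-scan: it sorts each row's non-dot values and returns False when two adjacent sorted values are equal.
import Mathlib
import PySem

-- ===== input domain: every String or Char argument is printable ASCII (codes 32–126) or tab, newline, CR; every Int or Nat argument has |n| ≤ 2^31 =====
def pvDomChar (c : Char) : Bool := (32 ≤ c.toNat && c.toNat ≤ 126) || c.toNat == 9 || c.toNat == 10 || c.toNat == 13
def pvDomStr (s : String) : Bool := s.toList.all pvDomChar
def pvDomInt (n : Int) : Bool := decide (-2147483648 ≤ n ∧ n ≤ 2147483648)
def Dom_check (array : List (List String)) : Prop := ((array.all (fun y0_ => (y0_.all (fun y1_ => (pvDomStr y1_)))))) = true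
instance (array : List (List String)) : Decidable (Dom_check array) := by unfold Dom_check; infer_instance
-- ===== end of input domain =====

-- B replaces A's per-row count dictionary plus max-of-counts scan by sort-then-scan:
-- sort the row's non-dot values and look for two equal adjacent entries; objective: alternative.

-- ===== PORT A =====
-- literal port of A: per row build a count dict over non-'.' entries, skip if empty,
-- return False if the max count exceeds 1.  max(co.values()) is only evaluated when the
-- values list is nonempty (the 'if not len' guard), so `.getD 0` is never taken — exact.
def check (array : List (List String)) : Bool :=
  match array with
  | [] => true
  | i :: rest =>
    let co := i.foldl
      (fun co j => if j ≠ "." then PySem.Dict.modify co j 0 (· + 1) else co)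
      (PySem.Dict.empty : PySem.Dict String Int)
    if (PySem.Dict.values co).length = 0 then check rest
    else if ((PySem.List.max? (PySem.Dict.values co) (fun x => x)).getD 0) > 1 then false
    else check rest

-- ===== PORT B =====
-- the inner 'for a, b in zip(s, s[1:])' scan of Source B: does s contain two equal adjacent entries?
def hasAdjDup (s : List String) : Bool :=
  match s with
  | a :: b :: t => a == b || hasAdjDup (b :: t)
  | _ => false

-- literal port of B: sort the row's non-'.' values, fail on an equal adjacent pair.
def check_alt (array : List (List String)) : Bool :=
  match array with
  | [] => true
  | row :: rest =>
    let s := PySem.List.sorted (row.filter (fun v => v ≠ ".")) (fun x => x) false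
    if hasAdjDup s then false else check_alt rest

-- ===== PRECONDITION & SPEC =====
def Spec_check (array : List (List String)) (out : Bool) : Prop := out = check_alt array
instance (array : List (List String)) (out : Bool) : Decidable (Spec_check array out) := by unfold Spec_check; infer_instance

-- ===== CLAIM (what is proved, stated in full; the proofs are below) =====
def Claim_equal_check : Prop := ∀ (array : List (List String)), Dom_check array → Spec_check array (check array)

-- ===== LEMMAS AND PROOFS =====

-- a conditional accumulation loop is the plain loop over the filtered list
theorem foldl_if_filter {α β : Type} (p : α → Prop) [DecidablePred p] (f : β → α → β)
    (l : List α) (d : β) :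
    l.foldl (fun d x => if p x then f d x else d) d
      = (l.filter (fun x => decide (p x))).foldl f d := by
  induction l generalizing d with
  | nil => rfl
  | cons x xs ih => by_cases h : p x <;> simp [h, ih]

theorem values_counter_eq (vals : List String) :
    PySem.Dict.values (PySem.Dict.counter vals)
      = (PySem.Set.ofList vals).map (fun k => (vals.count k : Int)) := by
  simp [PySem.Dict.values, PySem.Dict.items_counter]

-- A's row test: the max of the counter's values exceeds 1 iff the row has a duplicate
theorem max_values_gt_one_iff (vals : List String) :
    ((PySem.List.max? (PySem.Dict.values (PySem.Dict.counter vals)) (fun x => x)).getD 0 > 1)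
      ↔ ¬ vals.Nodup := by
  rw [values_counter_eq]
  constructor
  · intro h hnd
    rcases hm : PySem.List.max? ((PySem.Set.ofList vals).map (fun k => (vals.count k : Int)))
        (fun x => x) with _ | m
    · simp [hm] at h
    · have hmem := PySem.List.max?_mem hm
      simp only [List.mem_map] at hmem
      obtain ⟨k, _, hk⟩ := hmem
      rw [hm] at h; simp at h
      rw [← hk] at h
      have := List.nodup_iff_count_le_one.mp hnd k
      omega
  · intro hnd
    have : ∃ k, 2 ≤ vals.count k := by
      by_contra hc
      rw [not_exists] at hc
      exact hnd (List.nodup_iff_count_le_one.mpr (fun a => by have := hc a; omega))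
    obtain ⟨k, hk⟩ := this
    have hkmem : k ∈ vals := List.count_pos_iff.mp (by omega)
    have hkset : (vals.count k : Int) ∈
        (PySem.Set.ofList vals).map (fun k => (vals.count k : Int)) := by
      refine List.mem_map_of_mem ?_
      simp [PySem.Set.mem_ofList, hkmem]
    rcases hm : PySem.List.max? ((PySem.Set.ofList vals).map (fun k => (vals.count k : Int)))
        (fun x => x) with _ | m
    · rw [PySem.List.max?_eq_none_iff] at hm; simp [hm] at hkset
    · have := PySem.List.max?_isMax hm _ hkset
      simp only [Option.getD_some]
      simp only at this
      omega

theorem values_counter_nil_iff (vals : List String) :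
    PySem.Dict.values (PySem.Dict.counter vals) = [] ↔ vals = [] := by
  rw [values_counter_eq]
  cases vals with
  | nil => simp [PySem.Set.ofList_nil]
  | cons x xs => simp [PySem.Set.ofList_cons]

-- a list with no equal adjacent pair and nondecreasing adjacent pairs is an adjacent <-chain
theorem isChain_lt_of_noAdjDup (s : List String) (hp : s.Pairwise (· ≤ ·))
    (h : hasAdjDup s = false) : s.IsChain (· < ·) := by
  induction s with
  | nil => simp
  | cons a t ih =>
    cases t with
    | nil => simp
    | cons b u =>
      simp only [hasAdjDup, Bool.or_eq_false_iff, beq_eq_false_iff_ne] at h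
      rw [List.isChain_cons_cons]
      refine ⟨lt_of_le_of_ne (List.rel_of_pairwise_cons hp (by simp)) h.1,
        ih (List.Pairwise.sublist (by simp) hp) h.2⟩

-- a duplicate-free list has no equal adjacent pair
theorem hasAdjDup_eq_false_of_nodup (s : List String) (hnd : s.Nodup) :
    hasAdjDup s = false := by
  induction s with
  | nil => rfl
  | cons a t ih =>
    cases t with
    | nil => rfl
    | cons b u =>
      simp only [hasAdjDup, Bool.or_eq_false_iff, beq_eq_false_iff_ne]
      exact ⟨(by simpa using (List.nodup_cons.mp hnd).1 : ¬a = b ∧ a ∉ u).1, ih hnd.of_cons⟩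

-- B's row test on the sorted list decides duplication in the row
theorem hasAdjDup_sorted_iff (vals : List String) :
    hasAdjDup (PySem.List.sorted vals (fun x => x) false) = true ↔ ¬ vals.Nodup := by
  have hperm : (PySem.List.sorted vals (fun x => x) false).Perm vals :=
    PySem.List.sorted_perm vals (fun x => x) false
  have hpair : (PySem.List.sorted vals (fun x => x) false).Pairwise (fun a b => a ≤ b) :=
    PySem.List.sorted_pairwise vals (fun x => x)
  constructor
  · intro h hnd
    rw [hasAdjDup_eq_false_of_nodup _ (hperm.nodup_iff.mpr hnd)] at h
    exact Bool.false_ne_true h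
  · intro hnd
    by_contra h
    rw [Bool.not_eq_true] at h
    have := (List.isChain_iff_pairwise.mp (isChain_lt_of_noAdjDup _ hpair h)).imp
      (fun hab => ne_of_lt hab)
    exact hnd (hperm.nodup_iff.mp this)

theorem check_eq_alt (array : List (List String)) : check array = check_alt array := by
  induction array with
  | nil => rfl
  | cons i rest ih =>
    unfold check check_alt
    simp only [foldl_if_filter (fun j : String => j ≠ "."), ← PySem.Dict.counter_eq_foldl]
    set vals := i.filter (fun j => decide (j ≠ ".")) with hv
    by_cases hnil : vals = []
    · simp [hnil, ih, PySem.List.sorted, hasAdjDup,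
        show PySem.Dict.values (PySem.Dict.counter ([] : List String)) = [] from rfl]
    · by_cases hnd : vals.Nodup
      · have h1 : ¬ ((PySem.List.max? (PySem.Dict.values (PySem.Dict.counter vals))
            (fun x => x)).getD 0 > 1) := by
          rw [max_values_gt_one_iff]; exact not_not_intro hnd
        have h2 : ¬ (hasAdjDup (PySem.List.sorted vals (fun x => x) false) = true) := by
          rw [hasAdjDup_sorted_iff]; exact not_not_intro hnd
        simp [values_counter_nil_iff, hnil, h1, h2, ih]
      · have h1 : (PySem.List.max? (PySem.Dict.values (PySem.Dict.counter vals))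
            (fun x => x)).getD 0 > 1 := (max_values_gt_one_iff vals).mpr hnd
        have h2 : hasAdjDup (PySem.List.sorted vals (fun x => x) false) = true :=
          (hasAdjDup_sorted_iff vals).mpr hnd
        simp [values_counter_nil_iff, hnil, h1, h2]

-- ===== VERDICT (by name: the statement is the Claim_ definition above) =====
theorem check_spec : Claim_equal_check := by
  intro array _
  exact check_eq_alt array
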